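-- pv_equiv track=rewrite | github.com/LSFB-Team/lsfb-dataset | lsfb-dataset/src/lsfb_dataset/utils/annotations.py | vec_to_annotations
-- ===== SOURCE A (Python) =====
-- def vec_to_annotations(vec):
--     annots = []
--     sign_start = None
--
--     for idx, value in enumerate(vec):
--         if value != 1 and sign_start is not None:
--             annots.append((sign_start, idx))
--             sign_start = None
--
--         if value == 1 and sign_start is None:
--             sign_start = idx
--
--     if sign_start is not None:
--         annots.append((sign_start, len(vec)-1))
--
--     return annots
-- ===== SOURCE B (Python) =====
-- def vec_to_annotations(vec):
--     n = len(vec)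
--     out = []
--     i = 0
--     while i < n:
--         if vec[i] == 1:
--             j = i
--             while j < n and vec[j] == 1:
--                 j += 1
--             out.append((i, j if j < n else n - 1))
--             i = j
--         else:
--             i += 1
--     return out
-- ===== Notes on version B (the rewrite author's own statement) =====
-- stated objective: alternative
-- what changed: Replaces the per-element open/close state machine (Optional sign_start) with a two-pointer scan: an inner loop finds the end of each maximal run of 1s and the interval is emitted in one step.
import Mathlib
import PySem

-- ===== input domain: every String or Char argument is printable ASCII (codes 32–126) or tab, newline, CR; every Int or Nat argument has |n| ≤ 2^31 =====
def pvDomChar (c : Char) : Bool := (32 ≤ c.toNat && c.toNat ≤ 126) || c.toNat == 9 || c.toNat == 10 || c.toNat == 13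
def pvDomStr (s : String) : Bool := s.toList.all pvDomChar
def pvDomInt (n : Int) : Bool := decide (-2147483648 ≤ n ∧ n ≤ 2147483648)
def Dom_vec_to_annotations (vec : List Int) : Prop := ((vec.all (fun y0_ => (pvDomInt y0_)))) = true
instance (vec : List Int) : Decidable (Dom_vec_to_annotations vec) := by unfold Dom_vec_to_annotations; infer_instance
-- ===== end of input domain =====

-- B replaces A's open/close state machine by a two-pointer run scan; same O(n) cost, return value proved equal.

-- ===== PORT A =====
-- loop body of A: both ifs in Python order, state = (annots, sign_start)
def pvStepA (st : List (Int × Int) × Option Int) (p : Int × Int) : List (Int × Int) × Option Int :=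
  let st1 :=
    if p.2 ≠ 1 ∧ st.2 ≠ none then
      (st.1 ++ [(st.2.getD 0, p.1)], (none : Option Int))
    else st
  if p.2 = 1 ∧ st1.2 = none then (st1.1, some p.1) else st1

-- epilogue of A: if sign_start is not None, append (sign_start, m-1) with m = len(vec)
def pvFin (st : List (Int × Int) × Option Int) (m : Int) : List (Int × Int) :=
  match st with
  | (annots, some s) => annots ++ [(s, m - 1)]
  | (annots, none) => annots

def vec_to_annotations (vec : List Int) : List (Int × Int) :=
  pvFin ((PySem.List.enumerate vec).foldl pvStepA ([], none)) (vec.length : Int)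

-- ===== PORT B =====
-- inner while of Source B: advance j while j < n and vec[j] == 1
def pvInner (vec : List Int) (n : Nat) (j : Nat) : Nat :=
  if j < n ∧ vec.getD j 0 = 1 then pvInner vec n (j + 1) else j
termination_by n - j
decreasing_by omega

-- termination facts for the outer loop (cited by its decreasing_by)
theorem pvInner_ge (vec : List Int) (n j : Nat) : j ≤ pvInner vec n j := by
  induction j using (pvInner.induct vec n) with
  | case1 j h ih => rw [pvInner, if_pos h]; omega
  | case2 j h => rw [pvInner, if_neg h]

theorem pvInner_gt (vec : List Int) (n j : Nat) (h1 : j < n) (h2 : vec.getD j 0 = 1) :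
    j < pvInner vec n j := by
  rw [pvInner, if_pos ⟨h1, h2⟩]
  have := pvInner_ge vec n (j + 1); omega

-- outer while of Source B
def pvOuter (vec : List Int) (n : Nat) (i : Nat) : List (Int × Int) :=
  if h : i < n then
    if h1 : vec.getD i 0 = 1 then
      let j := pvInner vec n i
      ((i : Int), if j < n then (j : Int) else (n : Int) - 1) :: pvOuter vec n j
    else pvOuter vec n (i + 1)
  else []
termination_by n - i
decreasing_by
  · have := pvInner_gt vec n i h h1; omega
  · omega

def vec_to_annotations_alt (vec : List Int) : List (Int × Int) :=
  pvOuter vec vec.length 0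

-- ===== PRECONDITION & SPEC =====
def Spec_vec_to_annotations (vec : List Int) (out : List (Int × Int)) : Prop := out = vec_to_annotations_alt vec
instance (vec : List Int) (out : List (Int × Int)) : Decidable (Spec_vec_to_annotations vec out) := by unfold Spec_vec_to_annotations; infer_instance

-- ===== CLAIM (what is proved, stated in full; the proofs are below) =====
def Claim_equal_vec_to_annotations : Prop := ∀ (vec : List Int), Dom_vec_to_annotations vec → Spec_vec_to_annotations vec (vec_to_annotations vec)

-- ===== LEMMAS AND PROOFS =====

-- reference recursion for A's loop: state = optional start of the open run
def loopA : List Int → Int → Option Int → List (Int × Int)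
  | [], idx, some s => [(s, idx - 1)]
  | [], _, none => []
  | v :: t, idx, some s =>
      if v = 1 then loopA t (idx + 1) (some s) else (s, idx) :: loopA t (idx + 1) none
  | v :: t, idx, none =>
      if v = 1 then loopA t (idx + 1) (some idx) else loopA t (idx + 1) none

-- reference recursion for B's scan: takeWhile finds the current run of 1s
def loopB : List Int → Int → List (Int × Int)
  | [], _ => []
  | v :: t, i =>
      if h : v = 1 then
        let L := ((v :: t).takeWhile (· = 1)).length
        (i, if L < (v :: t).length then i + L else i + ((v :: t).length : Int) - 1)
          :: loopB ((v :: t).drop L) (i + L)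
      else loopB t (i + 1)
termination_by t => t.length
decreasing_by
  · simp only [List.takeWhile_cons, decide_eq_true h, if_pos]
    simp [List.length_drop]
  · simp


theorem loopB_nil (i : Int) : loopB [] i = [] := by rw [loopB]

theorem loopB_cons_one (v : Int) (t : List Int) (i : Int) (hv : v = 1) :
    loopB (v :: t) i =
      (i, if ((v :: t).takeWhile (· = 1)).length < (v :: t).length
            then i + ((v :: t).takeWhile (· = 1)).length
            else i + ((v :: t).length : Int) - 1)
        :: loopB ((v :: t).drop ((v :: t).takeWhile (· = 1)).length)
             (i + ((v :: t).takeWhile (· = 1)).length) := by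
  rw [loopB.eq_def]
  simp only []
  rw [dif_pos hv]

theorem loopB_cons_ne (v : Int) (t : List Int) (i : Int) (hv : v ≠ 1) :
    loopB (v :: t) i = loopB t (i + 1) := by
  rw [loopB.eq_def]
  simp only []
  rw [dif_neg hv]

theorem foldA_eq_loopA (t : List Int) :
    ∀ (k : Int) (acc : List (Int × Int)) (ss : Option Int),
      pvFin ((PySem.List.enumerate t k).foldl pvStepA (acc, ss)) (k + t.length)
        = acc ++ loopA t k ss := by
  induction t with
  | nil =>
      intro k acc ss
      cases ss <;> simp [PySem.List.enumerate, pvFin, loopA]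
  | cons v t ih =>
      intro k acc ss
      rw [PySem.List.enumerate_cons]
      simp only [List.foldl_cons, List.length_cons]
      push_cast
      rw [show k + ((t.length : Int) + 1) = (k + 1) + t.length by ring]
      by_cases hv : v = 1
      · cases ss with
        | none =>
            have hst : pvStepA (acc, none) (k, v) = (acc, some k) := by simp [pvStepA, hv]
            rw [hst, ih (k + 1) acc (some k), loopA, if_pos hv]
        | some s =>
            have hst : pvStepA (acc, some s) (k, v) = (acc, some s) := by simp [pvStepA, hv]
            rw [hst, ih (k + 1) acc (some s), loopA, if_pos hv]
      · cases ss with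
        | none =>
            have hst : pvStepA (acc, none) (k, v) = (acc, none) := by simp [pvStepA, hv]
            rw [hst, ih (k + 1) acc none, loopA, if_neg hv]
        | some s =>
            have hst : pvStepA (acc, some s) (k, v) = (acc ++ [(s, k)], none) := by
              simp [pvStepA, hv]
            rw [hst, ih (k + 1) (acc ++ [(s, k)]) none, loopA, if_neg hv]
            simp

theorem loopA_eq_loopB (t : List Int) :
    (∀ i : Int, loopA t i none = loopB t i) ∧
    (∀ (i s : Int),
      loopA t i (some s) =
        (s, if (t.takeWhile (· = 1)).length < t.length then i + (t.takeWhile (· = 1)).length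
            else i + (t.length : Int) - 1)
          :: loopB (t.drop (t.takeWhile (· = 1)).length) (i + (t.takeWhile (· = 1)).length)) := by
  induction t with
  | nil =>
      constructor
      · intro i; rw [loopA, loopB_nil]
      · intro i s; rw [loopA]; simp [loopB_nil]
  | cons v t ih =>
      obtain ⟨ih1, ih2⟩ := ih
      by_cases hv : v = 1
      · have htw : ((v :: t).takeWhile (· = 1)) = v :: t.takeWhile (· = 1) := by
          simp [hv]
        constructor
        · intro i
          rw [loopA, if_pos hv, ih2 (i + 1) i, loopB_cons_one v t i hv, htw]
          simp only [List.length_cons, List.drop_succ_cons]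
          refine List.cons_eq_cons.mpr ⟨Prod.ext_iff.mpr ⟨rfl, ?_⟩, ?_⟩
          · split_ifs <;> omega
          · congr 1
            push_cast; ring
        · intro i s
          rw [loopA, if_pos hv, ih2 (i + 1) s, htw]
          simp only [List.length_cons, List.drop_succ_cons]
          refine List.cons_eq_cons.mpr ⟨Prod.ext_iff.mpr ⟨rfl, ?_⟩, ?_⟩
          · split_ifs <;> omega
          · congr 1
            push_cast; ring
      · have htw : ((v :: t).takeWhile (· = 1)) = [] := by
          simp [hv]
        constructor
        · intro i
          rw [loopA, if_neg hv, ih1 (i + 1), loopB_cons_ne v t i hv]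
        · intro i s
          rw [loopA, if_neg hv, ih1 (i + 1), htw]
          simp only [List.length_nil, Nat.cast_zero, add_zero, List.drop_zero]
          refine List.cons_eq_cons.mpr ⟨Prod.ext_iff.mpr ⟨rfl, ?_⟩, ?_⟩
          · rw [if_pos (by simp)]
          · rw [loopB_cons_ne v t i hv]

theorem pvInner_eq (vec : List Int) (j : Nat) :
    pvInner vec vec.length j = j + ((vec.drop j).takeWhile (· = 1)).length := by
  induction j using (pvInner.induct vec vec.length) with
  | case1 j h ih =>
      obtain ⟨h1, h2⟩ := h
      rw [pvInner, if_pos ⟨h1, h2⟩, ih]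
      rw [List.drop_eq_getElem_cons h1]
      rw [List.getD_eq_getElem _ _ h1] at h2
      simp [h2]
      omega
  | case2 j h =>
      rw [pvInner, if_neg h]
      by_cases h1 : j < vec.length
      · have h2 : vec.getD j 0 ≠ 1 := fun hc => h ⟨h1, hc⟩
        rw [List.getD_eq_getElem _ _ h1] at h2
        rw [List.drop_eq_getElem_cons h1]
        simp [h2]
      · have : vec.length ≤ j := by omega
        simp [List.drop_eq_nil_of_le this]

theorem pvOuter_eq (vec : List Int) : ∀ (i : Nat), i ≤ vec.length →
    pvOuter vec vec.length i = loopB (vec.drop i) (i : Int) := by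
  intro i hi
  induction hL : vec.length - i using Nat.strong_induction_on generalizing i with
  | _ fuel ih =>
  rw [pvOuter]
  by_cases h : i < vec.length
  · rw [dif_pos h]
    have hdrop := List.drop_eq_getElem_cons h
    by_cases h1 : vec.getD i 0 = 1
    · rw [dif_pos h1]
      have h1' : vec[i] = 1 := by rwa [List.getD_eq_getElem _ _ h] at h1
      have hin : pvInner vec vec.length i = i + ((vec.drop i).takeWhile (· = 1)).length :=
        pvInner_eq vec i
      set L := ((vec.drop i).takeWhile (· = 1)).length with hLdef
      have hLle : L ≤ (vec.drop i).length := (List.takeWhile_prefix _).length_le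
      have hlen : (vec.drop i).length = vec.length - i := by simp
      have hLpos : 1 ≤ L := by
        rw [hLdef, hdrop]; simp [h1']
      rw [hdrop, loopB_cons_one _ _ _ h1', ← hdrop]
      simp only [hin, ← hLdef, hlen, List.drop_drop]
      rw [ih (vec.length - (i + L)) (by omega) (i + L) (by omega) rfl]
      refine List.cons_eq_cons.mpr ⟨Prod.ext_iff.mpr ⟨rfl, ?_⟩, ?_⟩
      · split_ifs <;> omega
      · norm_cast
    · rw [dif_neg h1]
      have h1' : vec[i] ≠ 1 := by rwa [List.getD_eq_getElem _ _ h] at h1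
      rw [ih (vec.length - (i + 1)) (by omega) (i + 1) (by omega) rfl]
      rw [hdrop, loopB_cons_ne _ _ _ h1']
      norm_cast
  · rw [dif_neg h]
    have : vec.length ≤ i := by omega
    rw [List.drop_eq_nil_of_le this, loopB_nil]

-- ===== VERDICT (by name: the statement is the Claim_ definition above) =====
theorem vec_to_annotations_spec : Claim_equal_vec_to_annotations := by
  intro vec _
  unfold Spec_vec_to_annotations vec_to_annotations vec_to_annotations_alt
  have hA := foldA_eq_loopA vec 0 [] none
  simp only [zero_add, List.nil_append] at hA
  have hB := pvOuter_eq vec 0 (Nat.zero_le _)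
  simp only [List.drop_zero, Nat.cast_zero] at hB
  rw [hA, hB, (loopA_eq_loopB vec).1 0]
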